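-- pv_equiv track=rewrite | github.com/openai/parameter-golf | HDC_Core_Model/Templates_Tools/grid_templates.py | extract_boundary
-- ===== SOURCE A (Python) =====
-- from typing import List, Dict, Tuple, Optional, Any, Callable
--
-- Grid = List[List[int]]
--
-- def extract_boundary(grid: Grid) -> Grid:
--     """
--     Extract only the boundary cells, removing interior (set to 0).
--
--     This creates a hollow outline from a filled shape.
--     """
--     if not grid or not grid[0]:
--         return grid
--
--     height, width = len(grid), len(grid[0])
--     result = [[0] * width for _ in range(height)]
--
--     for y in range(height):
--         for x in range(width):
--             if grid[y][x] != 0: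
--                 is_boundary = False
--
--                 # Check if on edge
--                 if y == 0 or y == height - 1 or x == 0 or x == width - 1:
--                     is_boundary = True
--                 else:
--                     # Check 4-connected neighbors
--                     for dy, dx in [(-1, 0), (1, 0), (0, -1), (0, 1)]:
--                         ny, nx = y + dy, x + dx
--                         if 0 <= ny < height and 0 <= nx < width:
--                             if grid[ny][nx] == 0:
--                                 is_boundary = True
--                                 break
--
--                 if is_boundary:
--                     result[y][x] = grid[y][x]  # Keep original color
--
--     return result
-- ===== SOURCE B (Python) =====
-- from typing import List
--
-- Grid = List[List[int]]
--
-- def extract_boundary(grid: Grid) -> Grid: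
--     """
--     Extract only the boundary cells, removing interior (set to 0).
--
--     Background-driven rewrite: copy nonzero cells lying on the grid border,
--     then propagate 'boundary' outward from each empty cell to its nonzero
--     4-neighbors, instead of having every filled cell query its own neighbors.
--     """
--     if not grid or not grid[0]:
--         return grid
--
--     height, width = len(grid), len(grid[0])
--     result = [[0] * width for _ in range(height)]
--
--     # Nonzero cells on the grid border are always boundary.
--     for y in range(height):
--         for x in range(width):
--             if (y == 0 or y == height - 1 or x == 0 or x == width - 1) and grid[y][x] != 0:
--                 result[y][x] = grid[y][x]
--
--     # Every nonzero cell next to a background cell is boundary.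
--     for y in range(height):
--         for x in range(width):
--             if grid[y][x] == 0:
--                 for dy, dx in ((-1, 0), (1, 0), (0, -1), (0, 1)):
--                     ny, nx = y + dy, x + dx
--                     if 0 <= ny < height and 0 <= nx < width and grid[ny][nx] != 0:
--                         result[ny][nx] = grid[ny][nx]
--
--     return result
-- ===== Notes on version B (the rewrite author's own statement) =====
-- stated objective: alternative
-- what changed: Inverted, background-driven traversal: instead of each filled cell testing its own 4-neighbors for a zero, B copies nonzero border cells and then loops over the zero cells only, marking each in-bounds nonzero 4-neighbor of a zero cell as boundary.
import Mathlib
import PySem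

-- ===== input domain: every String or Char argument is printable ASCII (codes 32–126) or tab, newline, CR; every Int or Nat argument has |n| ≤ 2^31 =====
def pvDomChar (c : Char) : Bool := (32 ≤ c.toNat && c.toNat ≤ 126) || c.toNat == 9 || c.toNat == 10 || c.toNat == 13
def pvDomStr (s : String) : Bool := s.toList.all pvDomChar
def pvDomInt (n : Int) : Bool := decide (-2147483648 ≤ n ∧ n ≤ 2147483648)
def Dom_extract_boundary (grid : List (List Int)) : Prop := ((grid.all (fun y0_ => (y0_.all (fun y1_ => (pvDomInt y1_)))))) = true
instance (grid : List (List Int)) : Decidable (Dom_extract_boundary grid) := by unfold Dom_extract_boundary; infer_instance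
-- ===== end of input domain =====

-- B re-implements A with an inverted, background-driven traversal (border copy, then marking the
-- nonzero 4-neighbors of each zero cell); same return value, same O(H*W) cost ("alternative").

-- ===== PORT A =====
-- grid[y][x]: indices used are nonnegative and in range under Pre_ (the default is never read there)
def pvGrid2 (grid : List (List Int)) (y x : Nat) : Int := (grid.getD y []).getD x 0
-- result[y][x] = v (indices always in range where used)
def pvSet2 (g : List (List Int)) (y x : Nat) (v : Int) : List (List Int) :=
  g.set y ((g.getD y []).set x v)
-- the literal list [(-1,0),(1,0),(0,-1),(0,1)]
def pvDirs : List (Int × Int) := [(-1, 0), (1, 0), (0, -1), (0, 1)]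

def extract_boundary (grid : List (List Int)) : List (List Int) :=
  -- `if not grid or not grid[0]` (grid = [] also makes headD [] = [])
  if grid.headD [] = [] then grid
  else
    let height := grid.length
    let width := (grid.headD []).length
    let result := List.replicate height (List.replicate width (0 : Int))
    -- for y in range(height): for x in range(width): … (loop counters are nonnegative: ℕ ranges)
    (List.range height).foldl (fun res y =>
      (List.range width).foldl (fun res x =>
        if pvGrid2 grid y x ≠ 0 then
          let is_boundary : Bool :=
            if y = 0 ∨ y = height - 1 ∨ x = 0 ∨ x = width - 1 then true
            else
              -- `for dy,dx in […]: … break`  ≡  any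
              pvDirs.any (fun d =>
                decide (0 ≤ (y : Int) + d.1 ∧ (y : Int) + d.1 < (height : Int) ∧
                    0 ≤ (x : Int) + d.2 ∧ (x : Int) + d.2 < (width : Int)) &&
                  (pvGrid2 grid ((y : Int) + d.1).toNat ((x : Int) + d.2).toNat == 0))
          if is_boundary then pvSet2 res y x (pvGrid2 grid y x) else res
        else res) res) result

-- ===== PORT B =====
def extract_boundary_alt (grid : List (List Int)) : List (List Int) :=
  if grid.headD [] = [] then grid
  else
    let height := grid.length
    let width := (grid.headD []).length
    let result := List.replicate height (List.replicate width (0 : Int))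
    -- pass 1: nonzero cells on the grid border are always boundary
    let result :=
      (List.range height).foldl (fun res y =>
        (List.range width).foldl (fun res x =>
          if (y = 0 ∨ y = height - 1 ∨ x = 0 ∨ x = width - 1) ∧ pvGrid2 grid y x ≠ 0 then
            pvSet2 res y x (pvGrid2 grid y x)
          else res) res) result
    -- pass 2: every nonzero cell next to a background cell is boundary
    (List.range height).foldl (fun res y =>
      (List.range width).foldl (fun res x =>
        if pvGrid2 grid y x = 0 then
          pvDirs.foldl (fun res d =>
            if 0 ≤ (y : Int) + d.1 ∧ (y : Int) + d.1 < (height : Int) ∧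
                0 ≤ (x : Int) + d.2 ∧ (x : Int) + d.2 < (width : Int) ∧
                pvGrid2 grid ((y : Int) + d.1).toNat ((x : Int) + d.2).toNat ≠ 0 then
              pvSet2 res ((y : Int) + d.1).toNat ((x : Int) + d.2).toNat
                (pvGrid2 grid ((y : Int) + d.1).toNat ((x : Int) + d.2).toNat)
            else res) res
        else res) res) result

-- ===== PRECONDITION & SPEC =====
-- Pre_ excludes exactly the ragged grids (nonempty first row, some later row shorter than it),
-- on which the Python A raises IndexError (B raises there too).
def Pre_extract_boundary (grid : List (List Int)) : Prop :=
  ∀ row ∈ grid, (grid.headD []).length ≤ row.length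
instance (grid : List (List Int)) : Decidable (Pre_extract_boundary grid) := by
  unfold Pre_extract_boundary; infer_instance
def pvWitness_extract_boundary : List (List Int) := [[1, 1, 1], [1, 1, 1], [1, 1, 1]]

def Spec_extract_boundary (grid : List (List Int)) (out : List (List Int)) : Prop := out = extract_boundary_alt grid
instance (grid : List (List Int)) (out : List (List Int)) : Decidable (Spec_extract_boundary grid out) := by unfold Spec_extract_boundary; infer_instance

-- ===== CLAIM (what is proved, stated in full; the proofs are below) =====
def Claim_equal_extract_boundary : Prop := ∀ (grid : List (List Int)), Dom_extract_boundary grid → Pre_extract_boundary grid → Spec_extract_boundary grid (extract_boundary grid)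

-- ===== LEMMAS AND PROOFS =====

-- g is a rectangular hh × ww grid
def pvShape (g : List (List Int)) (hh ww : Nat) : Prop :=
  g.length = hh ∧ ∀ row ∈ g, row.length = ww

-- row-major list of all coordinates
def pvPairs (hh ww : Nat) : List (Nat × Nat) :=
  (List.range hh).flatMap (fun y => (List.range ww).map (fun x => (y, x)))

-- all (coordinate, direction) combinations of pass 2 of B
def pvTrips (hh ww : Nat) : List ((Nat × Nat) × (Int × Int)) :=
  (pvPairs hh ww).flatMap (fun p => pvDirs.map (fun d => (p, d)))

-- fold of conditional writes: element p may write val at its target t p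
def pvCW {P : Type} (val : Nat → Nat → Int) (C : P → Bool) (t : P → Nat × Nat)
    (g : List (List Int)) (l : List P) : List (List Int) :=
  l.foldl (fun res p => if C p then pvSet2 res (t p).1 (t p).2 (val (t p).1 (t p).2) else res) g

-- write condition of A's single pass, at cell p
def pvCA (grid : List (List Int)) (hh ww : Nat) (p : Nat × Nat) : Bool :=
  decide (pvGrid2 grid p.1 p.2 ≠ 0) &&
  (if p.1 = 0 ∨ p.1 = hh - 1 ∨ p.2 = 0 ∨ p.2 = ww - 1 then true
   else
     pvDirs.any (fun d =>
       decide (0 ≤ (p.1 : Int) + d.1 ∧ (p.1 : Int) + d.1 < (hh : Int) ∧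
           0 ≤ (p.2 : Int) + d.2 ∧ (p.2 : Int) + d.2 < (ww : Int)) &&
         (pvGrid2 grid ((p.1 : Int) + d.1).toNat ((p.2 : Int) + d.2).toNat == 0)))

-- write condition of B's pass 1, at cell p
def pvCB1 (grid : List (List Int)) (hh ww : Nat) (p : Nat × Nat) : Bool :=
  decide ((p.1 = 0 ∨ p.1 = hh - 1 ∨ p.2 = 0 ∨ p.2 = ww - 1) ∧ pvGrid2 grid p.1 p.2 ≠ 0)

-- write condition of B's pass 2, at (cell, direction) q
def pvCB2 (grid : List (List Int)) (hh ww : Nat) (q : (Nat × Nat) × (Int × Int)) : Bool :=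
  decide (pvGrid2 grid q.1.1 q.1.2 = 0) &&
  decide (0 ≤ (q.1.1 : Int) + q.2.1 ∧ (q.1.1 : Int) + q.2.1 < (hh : Int) ∧
      0 ≤ (q.1.2 : Int) + q.2.2 ∧ (q.1.2 : Int) + q.2.2 < (ww : Int) ∧
      pvGrid2 grid ((q.1.1 : Int) + q.2.1).toNat ((q.1.2 : Int) + q.2.2).toNat ≠ 0)

-- target of a pass-2 write
def pvT2 (q : (Nat × Nat) × (Int × Int)) : Nat × Nat :=
  (((q.1.1 : Int) + q.2.1).toNat, ((q.1.2 : Int) + q.2.2).toNat)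

-- cell (j,i) has an in-bounds zero 4-neighbor
def pvNbrZero (grid : List (List Int)) (hh ww : Nat) (j i : Nat) : Prop :=
  ∃ d ∈ pvDirs, 0 ≤ (j : Int) + d.1 ∧ (j : Int) + d.1 < (hh : Int) ∧
    0 ≤ (i : Int) + d.2 ∧ (i : Int) + d.2 < (ww : Int) ∧
    pvGrid2 grid ((j : Int) + d.1).toNat ((i : Int) + d.2).toNat = 0

lemma mem_pvPairs (hh ww : Nat) (p : Nat × Nat) :
    p ∈ pvPairs hh ww ↔ p.1 < hh ∧ p.2 < ww := by
  simp [pvPairs]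
  constructor
  · rintro ⟨a, ha, b, hb, rfl⟩; exact ⟨ha, hb⟩
  · rintro ⟨h1, h2⟩; exact ⟨p.1, h1, p.2, h2, rfl⟩

lemma mem_pvTrips (hh ww : Nat) (q : (Nat × Nat) × (Int × Int)) :
    q ∈ pvTrips hh ww ↔ q.1.1 < hh ∧ q.1.2 < ww ∧ q.2 ∈ pvDirs := by
  rw [pvTrips, List.mem_flatMap]
  constructor
  · rintro ⟨p, hp, hq⟩
    rw [List.mem_map] at hq
    obtain ⟨d, hd, rfl⟩ := hq
    have := (mem_pvPairs hh ww p).1 hp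
    exact ⟨this.1, this.2, hd⟩
  · rintro ⟨h1, h2, h3⟩
    exact ⟨q.1, (mem_pvPairs hh ww q.1).2 ⟨h1, h2⟩, List.mem_map.2 ⟨q.2, h3, rfl⟩⟩

lemma pvShape_set (g : List (List Int)) (hh ww y x : Nat) (v : Int)
    (hs : pvShape g hh ww) : pvShape (pvSet2 g y x v) hh ww := by
  obtain ⟨h1, h2⟩ := hs
  by_cases hy : y < g.length
  · refine ⟨by simp [pvSet2, h1], ?_⟩
    intro row hrow
    rcases List.mem_or_eq_of_mem_set hrow with h | h
    · exact h2 _ h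
    · subst h
      rw [List.getD_eq_getElem _ _ hy]
      simp only [List.length_set]
      exact h2 _ (List.getElem_mem hy)
  · rw [pvSet2, List.set_eq_of_length_le (by omega)]
    exact ⟨h1, h2⟩

lemma pvGrid2_set_other (g : List (List Int)) (y x j i : Nat) (v : Int)
    (hne : ¬ (y = j ∧ x = i)) : pvGrid2 (pvSet2 g y x v) j i = pvGrid2 g j i := by
  by_cases hyj : y = j
  · subst hyj
    have hx : x ≠ i := fun h => hne ⟨rfl, h⟩
    by_cases hy : y < g.length
    · simp [pvGrid2, pvSet2, List.getD]
      rw [List.getElem?_set_self (by omega)]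
      simp [List.getElem?_set_ne hx]
    · rw [pvSet2, List.set_eq_of_length_le (by omega)]
  · simp [pvGrid2, pvSet2, List.getD]
    rw [List.getElem?_set_ne hyj]

lemma pvGrid2_set_same (g : List (List Int)) (hh ww y x : Nat) (v : Int)
    (hs : pvShape g hh ww) (hy : y < hh) (hx : x < ww) :
    pvGrid2 (pvSet2 g y x v) y x = v := by
  obtain ⟨h1, h2⟩ := hs
  have hy' : y < g.length := by omega
  have hrow : (g.getD y []).length = ww := by
    rw [List.getD_eq_getElem _ _ hy']; exact h2 _ (List.getElem_mem hy')
  have hset : y < (g.set y ((g.getD y []).set x v)).length := by simp; omega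
  rw [pvGrid2, pvSet2, List.getD_eq_getElem _ _ hset, List.getElem_set_self,
    List.getD_eq_getElem _ _ (by rw [List.length_set, hrow]; exact hx), List.getElem_set_self]

lemma pvGrid2_zeros (hh ww j i : Nat) :
    pvGrid2 (List.replicate hh (List.replicate ww (0 : Int))) j i = 0 := by
  simp [pvGrid2, List.getD, List.getElem?_replicate]
  split <;> simp [List.getElem?_replicate] <;> split <;> simp

lemma pvShape_zeros (hh ww : Nat) :
    pvShape (List.replicate hh (List.replicate ww (0 : Int))) hh ww := by
  exact ⟨by simp, fun row hrow => by simp [List.eq_of_mem_replicate hrow]⟩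

lemma pvShape_pvCW {P : Type} (val : Nat → Nat → Int) (C : P → Bool) (t : P → Nat × Nat)
    (g : List (List Int)) (l : List P) (hh ww : Nat) (hs : pvShape g hh ww) :
    pvShape (pvCW val C t g l) hh ww := by
  induction l generalizing g with
  | nil => exact hs
  | cons p l ih =>
    simp only [pvCW, List.foldl_cons]
    apply ih
    split
    · exact pvShape_set _ _ _ _ _ _ hs
    · exact hs

lemma pvGrid2_pvCW {P : Type} (val : Nat → Nat → Int) (C : P → Bool) (t : P → Nat × Nat)
    (g : List (List Int)) (l : List P) (hh ww : Nat) (hs : pvShape g hh ww)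
    (ht : ∀ p ∈ l, C p = true → (t p).1 < hh ∧ (t p).2 < ww) (j i : Nat) :
    pvGrid2 (pvCW val C t g l) j i =
      if ∃ p ∈ l, C p = true ∧ t p = (j, i) then val j i else pvGrid2 g j i := by
  induction l using List.reverseRecOn with
  | nil => simp [pvCW]
  | append_singleton l p ih =>
    have ht' : ∀ q ∈ l, C q = true → (t q).1 < hh ∧ (t q).2 < ww := by
      intro q hq; exact ht q (by simp [hq])
    have hstep : pvCW val C t g (l ++ [p])
        = if C p then pvSet2 (pvCW val C t g l) (t p).1 (t p).2 (val (t p).1 (t p).2)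
          else pvCW val C t g l := by
      simp [pvCW, List.foldl_append]
    rw [hstep]
    by_cases hC : C p = true
    · rw [if_pos hC]
      by_cases htp : t p = (j, i)
      · have hbl : (t p).1 < hh ∧ (t p).2 < ww := ht p (by simp) hC
        rw [htp] at hbl ⊢
        rw [pvGrid2_set_same _ hh ww _ _ _ (pvShape_pvCW val C t g l hh ww hs) hbl.1 hbl.2]
        rw [if_pos ⟨p, by simp, hC, htp⟩]
      · rw [pvGrid2_set_other _ _ _ _ _ _ (by
          intro hcontra
          exact htp (Prod.ext hcontra.1 hcontra.2)), ih ht']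
        congr 1
        simp only [eq_iff_iff]
        constructor
        · rintro ⟨q, hq, hCq, htq⟩; exact ⟨q, by simp [hq], hCq, htq⟩
        · rintro ⟨q, hq, hCq, htq⟩
          rcases List.mem_append.1 hq with h | h
          · exact ⟨q, h, hCq, htq⟩
          · simp at h; subst h; exact absurd htq htp
    · rw [if_neg hC, ih ht']
      congr 1
      simp only [eq_iff_iff]
      constructor
      · rintro ⟨q, hq, hCq, htq⟩; exact ⟨q, by simp [hq], hCq, htq⟩
      · rintro ⟨q, hq, hCq, htq⟩
        rcases List.mem_append.1 hq with h | h
        · exact ⟨q, h, hCq, htq⟩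
        · simp at h; subst h; exact absurd hCq hC

lemma foldl_flatMapG {G P Q : Type} (l : List P) (f : P → List Q) (s : G → Q → G) (g : G) :
    l.foldl (fun res p => (f p).foldl s res) g = (l.flatMap f).foldl s g := by
  induction l generalizing g with
  | nil => rfl
  | cons p l ih => simp [List.foldl_append, ih]

lemma foldl_range_pairs {G : Type} (F : G → Nat → Nat → G) (hh ww : Nat) (g : G) :
    (List.range hh).foldl (fun res y =>
      (List.range ww).foldl (fun res x => F res y x) res) g
    = (pvPairs hh ww).foldl (fun res p => F res p.1 p.2) g := by
  rw [pvPairs, ← foldl_flatMapG]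
  congr 1
  funext res y
  rw [List.foldl_map]

lemma grid_ext (g1 g2 : List (List Int)) (hh ww : Nat)
    (h1 : pvShape g1 hh ww) (h2 : pvShape g2 hh ww)
    (hp : ∀ j i, pvGrid2 g1 j i = pvGrid2 g2 j i) : g1 = g2 := by
  apply List.ext_getElem (h1.1.trans h2.1.symm)
  intro j hj hj'
  apply List.ext_getElem
  · rw [h1.2 _ (List.getElem_mem hj), h2.2 _ (List.getElem_mem hj')]
  · intro i hi hi'
    have := hp j i
    rw [pvGrid2, pvGrid2, List.getD_eq_getElem _ _ hj, List.getD_eq_getElem _ _ hj',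
      List.getD_eq_getElem _ _ hi, List.getD_eq_getElem _ _ hi'] at this
    exact this

-- A is one conditional-write pass over all cells
lemma portA_eq (grid : List (List Int)) (hg : ¬ grid.headD [] = []) :
    extract_boundary grid =
      pvCW (pvGrid2 grid) (pvCA grid grid.length (grid.headD []).length) id
        (List.replicate grid.length (List.replicate (grid.headD []).length (0 : Int)))
        (pvPairs grid.length (grid.headD []).length) := by
  simp only [extract_boundary, if_neg hg]
  rw [foldl_range_pairs]
  unfold pvCW
  congr 1
  funext res p
  by_cases hnz : pvGrid2 grid p.1 p.2 ≠ 0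
  · rw [if_pos hnz]
    simp only [pvCA, decide_eq_true hnz, Bool.true_and]
    rfl
  · rw [if_neg hnz]
    simp [pvCA, decide_eq_false hnz]

-- B is two conditional-write passes
lemma portB_eq (grid : List (List Int)) (hg : ¬ grid.headD [] = []) :
    extract_boundary_alt grid =
      pvCW (pvGrid2 grid) (pvCB2 grid grid.length (grid.headD []).length) pvT2
        (pvCW (pvGrid2 grid) (pvCB1 grid grid.length (grid.headD []).length) id
          (List.replicate grid.length (List.replicate (grid.headD []).length (0 : Int)))
          (pvPairs grid.length (grid.headD []).length))
        (pvTrips grid.length (grid.headD []).length) := by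
  simp only [extract_boundary_alt, if_neg hg]
  rw [foldl_range_pairs, foldl_range_pairs]
  have hpass1 :
      (pvPairs grid.length (grid.headD []).length).foldl
        (fun res p =>
          if (p.1 = 0 ∨ p.1 = grid.length - 1 ∨ p.2 = 0 ∨ p.2 = (grid.headD []).length - 1) ∧
              pvGrid2 grid p.1 p.2 ≠ 0 then
            pvSet2 res p.1 p.2 (pvGrid2 grid p.1 p.2)
          else res)
        (List.replicate grid.length (List.replicate (grid.headD []).length (0 : Int)))
      = pvCW (pvGrid2 grid) (pvCB1 grid grid.length (grid.headD []).length) id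
          (List.replicate grid.length (List.replicate (grid.headD []).length (0 : Int)))
          (pvPairs grid.length (grid.headD []).length) := by
    unfold pvCW
    congr 1
    funext res p
    by_cases hc : (p.1 = 0 ∨ p.1 = grid.length - 1 ∨ p.2 = 0 ∨ p.2 = (grid.headD []).length - 1) ∧
        pvGrid2 grid p.1 p.2 ≠ 0
    · simp [pvCB1, hc]
    · simp [pvCB1, hc]
  rw [hpass1]
  have hstep : (fun (res : List (List Int)) (p : Nat × Nat) =>
      if pvGrid2 grid p.1 p.2 = 0 then
        pvDirs.foldl (fun res d =>
          if 0 ≤ (p.1 : Int) + d.1 ∧ (p.1 : Int) + d.1 < (grid.length : Int) ∧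
              0 ≤ (p.2 : Int) + d.2 ∧ (p.2 : Int) + d.2 < ((grid.headD []).length : Int) ∧
              pvGrid2 grid ((p.1 : Int) + d.1).toNat ((p.2 : Int) + d.2).toNat ≠ 0 then
            pvSet2 res ((p.1 : Int) + d.1).toNat ((p.2 : Int) + d.2).toNat
              (pvGrid2 grid ((p.1 : Int) + d.1).toNat ((p.2 : Int) + d.2).toNat)
          else res) res
      else res)
      = (fun res p => (pvDirs.map (fun d => (p, d))).foldl
          (fun res q =>
            if pvCB2 grid grid.length (grid.headD []).length q then
              pvSet2 res (pvT2 q).1 (pvT2 q).2 (pvGrid2 grid (pvT2 q).1 (pvT2 q).2)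
            else res) res) := by
    funext res p
    rw [List.foldl_map]
    by_cases hz : pvGrid2 grid p.1 p.2 = 0
    · rw [if_pos hz]
      congr 1
      funext res d
      by_cases hc : 0 ≤ (p.1 : Int) + d.1 ∧ (p.1 : Int) + d.1 < (grid.length : Int) ∧
          0 ≤ (p.2 : Int) + d.2 ∧ (p.2 : Int) + d.2 < ((grid.headD []).length : Int) ∧
          pvGrid2 grid ((p.1 : Int) + d.1).toNat ((p.2 : Int) + d.2).toNat ≠ 0
      · simp [pvCB2, pvT2, hz, hc]
      · simp [pvCB2, pvT2, hz, hc]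
    · rw [if_neg hz]
      simp [pvDirs, pvCB2, hz]
  rw [hstep, foldl_flatMapG]
  rfl

lemma neg_mem_pvDirs {d : Int × Int} (hd : d ∈ pvDirs) : (-d.1, -d.2) ∈ pvDirs := by
  simp [pvDirs] at hd ⊢
  rcases hd with h | h | h | h <;> rw [h] <;> norm_num

-- ∃-with-fixed-target elimination over a coordinate list
lemma exists_pair_eq {l : List (Nat × Nat)} {C : Nat × Nat → Bool} {j i : Nat} :
    (∃ p ∈ l, C p = true ∧ (id p : Nat × Nat) = (j, i)) ↔ ((j, i) ∈ l ∧ C (j, i) = true) := by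
  constructor
  · rintro ⟨p, hp, hC, hpe⟩
    simp only [id_eq] at hpe
    subst hpe
    exact ⟨hp, hC⟩
  · rintro ⟨h1, h2⟩
    exact ⟨(j, i), h1, h2, rfl⟩

-- A's write condition at a cell, in Prop form
lemma pvCA_true_iff (grid : List (List Int)) (hh ww j i : Nat) :
    pvCA grid hh ww (j, i) = true ↔
      pvGrid2 grid j i ≠ 0 ∧
        ((j = 0 ∨ j = hh - 1 ∨ i = 0 ∨ i = ww - 1) ∨ pvNbrZero grid hh ww j i) := by
  unfold pvCA pvNbrZero
  by_cases hedge : j = 0 ∨ j = hh - 1 ∨ i = 0 ∨ i = ww - 1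
  · simp [hedge]
  · simp [hedge, List.any_eq_true, and_assoc]

-- A's existential write condition at a cell, in Prop form
lemma EA_iff (grid : List (List Int)) (hh ww j i : Nat) :
    (∃ p ∈ pvPairs hh ww, pvCA grid hh ww p = true ∧ (id p : Nat × Nat) = (j, i)) ↔
      j < hh ∧ i < ww ∧ pvGrid2 grid j i ≠ 0 ∧
        ((j = 0 ∨ j = hh - 1 ∨ i = 0 ∨ i = ww - 1) ∨ pvNbrZero grid hh ww j i) := by
  rw [exists_pair_eq, mem_pvPairs, pvCA_true_iff]
  tauto

-- B's pass-1 existential write condition at a cell, in Prop form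
lemma EB1_iff (grid : List (List Int)) (hh ww j i : Nat) :
    (∃ p ∈ pvPairs hh ww, pvCB1 grid hh ww p = true ∧ (id p : Nat × Nat) = (j, i)) ↔
      j < hh ∧ i < ww ∧ (j = 0 ∨ j = hh - 1 ∨ i = 0 ∨ i = ww - 1) ∧ pvGrid2 grid j i ≠ 0 := by
  rw [exists_pair_eq, mem_pvPairs]
  simp only [pvCB1, decide_eq_true_eq]
  tauto

-- B's pass-2 existential write condition at a cell, in Prop form
lemma EB2_iff (grid : List (List Int)) (hh ww j i : Nat) :
    (∃ q ∈ pvTrips hh ww, pvCB2 grid hh ww q = true ∧ pvT2 q = (j, i)) ↔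
      j < hh ∧ i < ww ∧ pvGrid2 grid j i ≠ 0 ∧ pvNbrZero grid hh ww j i := by
  constructor
  · rintro ⟨⟨⟨y, x⟩, d1, d2⟩, hmem, hC, htgt⟩
    rw [mem_pvTrips] at hmem
    obtain ⟨hy, hx, hd⟩ := hmem
    dsimp only at hy hx hd
    simp only [pvCB2, Bool.and_eq_true, decide_eq_true_eq] at hC
    obtain ⟨hz0, b1, b2, b3, b4, hnzt⟩ := hC
    simp only [pvT2, Prod.mk.injEq] at htgt
    obtain ⟨e1, e2⟩ := htgt
    have hj : j < hh := by omega
    have hi : i < ww := by omega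
    have e3 : ((j : Int) + -d1).toNat = y := by omega
    have e4 : ((i : Int) + -d2).toNat = x := by omega
    refine ⟨hj, hi, by rw [← e1, ← e2]; exact hnzt, (-d1, -d2), neg_mem_pvDirs hd, ?_⟩
    simp only
    refine ⟨by omega, by omega, by omega, by omega, ?_⟩
    rw [e3, e4]
    exact hz0
  · rintro ⟨hj, hi, hnz, ⟨d1, d2⟩, hd, b1, b2, b3, b4, hz0⟩
    simp only at b1 b2 b3 b4 hz0
    have e1 : (((((j : Int) + d1).toNat : Nat)) : Int) + -d1 = (j : Int) := by omega
    have e2 : (((((i : Int) + d2).toNat : Nat)) : Int) + -d2 = (i : Int) := by omega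
    refine ⟨((((j : Int) + d1).toNat, ((i : Int) + d2).toNat), (-d1, -d2)), ?_, ?_, ?_⟩
    · rw [mem_pvTrips]
      exact ⟨by simp only; omega, by simp only; omega, neg_mem_pvDirs hd⟩
    · simp only [pvCB2, Bool.and_eq_true, decide_eq_true_eq]
      refine ⟨hz0, ?_, ?_, ?_, ?_, ?_⟩
      · rw [e1]; omega
      · rw [e1]; omega
      · rw [e2]; omega
      · rw [e2]; omega
      · rw [e1, e2]
        simpa using hnz
    · simp only [pvT2]
      rw [e1, e2]
      simp

-- ===== VERDICT (by name: the statement is the Claim_ definition above) =====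
theorem extract_boundary_spec : Claim_equal_extract_boundary := by
  intro grid _ _
  unfold Spec_extract_boundary
  by_cases hg : grid.headD [] = []
  · simp only [extract_boundary, extract_boundary_alt, if_pos hg]
  · rw [portA_eq grid hg, portB_eq grid hg]
    set hh := grid.length with hhh
    set ww := (grid.headD []).length with hww
    have hz := pvShape_zeros hh ww
    have htA : ∀ p ∈ pvPairs hh ww, pvCA grid hh ww p = true → (id p : Nat × Nat).1 < hh ∧ (id p : Nat × Nat).2 < ww := by
      intro p hp _; exact (mem_pvPairs hh ww p).1 hp
    have htB1 : ∀ p ∈ pvPairs hh ww, pvCB1 grid hh ww p = true → (id p : Nat × Nat).1 < hh ∧ (id p : Nat × Nat).2 < ww := by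
      intro p hp _; exact (mem_pvPairs hh ww p).1 hp
    have htB2 : ∀ q ∈ pvTrips hh ww, pvCB2 grid hh ww q = true → (pvT2 q).1 < hh ∧ (pvT2 q).2 < ww := by
      intro q _ hC
      simp only [pvCB2, Bool.and_eq_true, decide_eq_true_eq] at hC
      obtain ⟨-, h1, h2, h3, h4, -⟩ := hC
      constructor <;> simp only [pvT2] <;> omega
    have hs1 : pvShape (pvCW (pvGrid2 grid) (pvCB1 grid hh ww) id
        (List.replicate hh (List.replicate ww (0 : Int))) (pvPairs hh ww)) hh ww :=
      pvShape_pvCW _ _ _ _ _ _ _ hz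
    apply grid_ext _ _ hh ww
    · exact pvShape_pvCW _ _ _ _ _ _ _ hz
    · exact pvShape_pvCW _ _ _ _ _ _ _ hs1
    · intro j i
      rw [pvGrid2_pvCW _ _ _ _ _ hh ww hz htA j i,
        pvGrid2_pvCW _ _ _ _ _ hh ww hs1 htB2 j i,
        pvGrid2_pvCW _ _ _ _ _ hh ww hz htB1 j i,
        pvGrid2_zeros]
      by_cases h2 : ∃ q ∈ pvTrips hh ww, pvCB2 grid hh ww q = true ∧ pvT2 q = (j, i)
      · rw [if_pos h2, if_pos ?_]
        have := (EB2_iff grid hh ww j i).1 h2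
        exact (EA_iff grid hh ww j i).2 ⟨this.1, this.2.1, this.2.2.1, Or.inr this.2.2.2⟩
      · rw [if_neg h2]
        by_cases h1 : ∃ p ∈ pvPairs hh ww, pvCB1 grid hh ww p = true ∧ (id p : Nat × Nat) = (j, i)
        · rw [if_pos h1, if_pos ?_]
          have := (EB1_iff grid hh ww j i).1 h1
          exact (EA_iff grid hh ww j i).2 ⟨this.1, this.2.1, this.2.2.2, Or.inl this.2.2.1⟩
        · rw [if_neg h1, if_neg ?_]
          intro hA
          obtain ⟨hj, hi, hnz, hcase⟩ := (EA_iff grid hh ww j i).1 hA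
          rcases hcase with hedge | hnbr
          · exact h1 ((EB1_iff grid hh ww j i).2 ⟨hj, hi, hedge, hnz⟩)
          · exact h2 ((EB2_iff grid hh ww j i).2 ⟨hj, hi, hnz, hnbr⟩)
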